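-- pv_equiv track=rewrite | github.com/HYndrome/Beakjoon-solution | 프로그래머스/3/12938. 최고의 집합/최고의 집합.py | solution
-- ===== SOURCE A (Python) =====
-- def solution(n, s):
--     i_div = s // n
--     i_rest = s % n
--     answer = []
--     if i_div == 0:
--         answer = [-1]
--     else:
--         for i in range(n - i_rest):
--             answer.append(i_div)
--         for i in range(i_rest):
--             answer.append(i_div + 1)
--     return answer
-- ===== SOURCE B (Python) =====
-- def solution(n, s):
--     if s // n == 0:
--         return [-1]
--     return [(s + i) // n for i in range(n)]
-- ===== Notes on version B (the rewrite author's own statement) =====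
-- stated objective: simpler
-- what changed: Replaces A's precomputed quotient/remainder and two append loops with a single index-driven pass that computes slot i directly as (s+i)//n, the +1 slots falling out of the floor division.
import Mathlib
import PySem

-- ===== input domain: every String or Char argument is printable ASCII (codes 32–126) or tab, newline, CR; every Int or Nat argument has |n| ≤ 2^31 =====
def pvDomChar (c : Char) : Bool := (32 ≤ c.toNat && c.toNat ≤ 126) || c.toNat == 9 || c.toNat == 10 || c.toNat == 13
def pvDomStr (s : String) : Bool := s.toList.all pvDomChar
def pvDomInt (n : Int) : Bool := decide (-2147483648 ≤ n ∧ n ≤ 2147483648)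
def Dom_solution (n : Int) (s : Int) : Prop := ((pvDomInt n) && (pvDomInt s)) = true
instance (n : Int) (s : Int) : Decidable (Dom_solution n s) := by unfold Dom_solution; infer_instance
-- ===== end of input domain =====

-- B replaces A's quotient/remainder precompute and two append loops with one direct
-- index-driven pass [(s+i)//n for i in range(n)] (objective: simpler).

-- ===== PORT A =====
def solution (n : Int) (s : Int) : List Int :=
  let i_div := PySem.Int.floordiv s n
  let i_rest := PySem.Int.mod s n
  let answer : List Int := []
  if i_div = 0 then
    [-1]
  else
    let answer := (PySem.List.pyRange 0 (n - i_rest) 1).foldl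
      (fun acc _ => acc ++ [i_div]) answer
    (PySem.List.pyRange 0 i_rest 1).foldl
      (fun acc _ => acc ++ [i_div + 1]) answer

-- ===== PORT B =====
def solution_alt (n : Int) (s : Int) : List Int :=
  if PySem.Int.floordiv s n = 0 then
    [-1]
  else
    (PySem.List.pyRange 0 n 1).map (fun i => PySem.Int.floordiv (s + i) n)

-- ===== PRECONDITION & SPEC =====
-- Pre_ excludes exactly n = 0, where Python A raises ZeroDivisionError at 's // n'.
def Pre_solution (n : Int) (s : Int) : Prop := n ≠ 0
instance (n : Int) (s : Int) : Decidable (Pre_solution n s) := by unfold Pre_solution; infer_instance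
def pvWitness_solution : Int × Int := (3, 11)

def Spec_solution (n : Int) (s : Int) (out : List Int) : Prop := out = solution_alt n s
instance (n : Int) (s : Int) (out : List Int) : Decidable (Spec_solution n s out) := by unfold Spec_solution; infer_instance

-- ===== CLAIM (what is proved, stated in full; the proofs are below) =====
def Claim_equal_solution : Prop := ∀ (n : Int) (s : Int), Dom_solution n s → Pre_solution n s → Spec_solution n s (solution n s)

-- ===== LEMMAS AND PROOFS =====

-- A nonpositive stop makes range() empty.
lemma pyRange_nonpos {m : Int} (h : m ≤ 0) : PySem.List.pyRange 0 m 1 = [] := by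
  simp [PySem.List.pyRange]; omega

-- Each slot of B's comprehension, for 0 < n and i in range(n): the first n - s%n
-- slots get s//n, the rest s//n + 1.
lemma slot_value (n s : Int) (hn : 0 < n) (i : Nat) (hi : (i : Int) < n) :
    PySem.Int.floordiv (s + (i : Int)) n =
      if (i : Int) < n - PySem.Int.mod s n then PySem.Int.floordiv s n
      else PySem.Int.floordiv s n + 1 := by
  have hqr := PySem.Int.floordiv_mul_add_mod s n
  have hr0 := PySem.Int.mod_nonneg s hn
  have hrn := PySem.Int.mod_lt s hn
  split_ifs with h
  · rw [PySem.Int.floordiv_eq_iff_of_pos hn]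
    constructor <;> nlinarith
  · rw [PySem.Int.floordiv_eq_iff_of_pos hn]
    constructor <;> nlinarith

lemma main_eq (n s : Int) (hn : n ≠ 0) : solution n s = solution_alt n s := by
  unfold solution solution_alt
  by_cases hq : PySem.Int.floordiv s n = 0
  · simp [hq]
  · simp only [hq, PySem.List.foldl_append_singleton_eq_map
      (f := fun _ => PySem.Int.floordiv s n),
      PySem.List.foldl_append_singleton_eq_map
      (f := fun _ => PySem.Int.floordiv s n + 1), List.nil_append]
    rcases lt_or_gt_of_ne hn with hneg | hpos
    · -- n < 0: every range is empty on both sides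
      obtain ⟨h1, h2⟩ := PySem.Int.mod_neg_bounds s hneg
      rw [pyRange_nonpos (by omega), pyRange_nonpos (by omega), pyRange_nonpos (by omega)]
      simp
    · -- n > 0
      have hr0 := PySem.Int.mod_nonneg s hpos
      have hrn := PySem.Int.mod_lt s hpos
      set r := PySem.Int.mod s n with hrdef
      set q := PySem.Int.floordiv s n with hqdef
      have hto : ∀ m : Int, 0 ≤ m →
          PySem.List.pyRange 0 m 1 = (List.range m.toNat).map (fun k : Nat => (k : Int)) := by
        intro m hm
        conv_lhs => rw [show m = ((m.toNat : Int)) by omega]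
        exact PySem.List.pyRange_zero_natCast m.toNat
      rw [hto (n - r) (by omega), hto r (by omega), hto n (by omega),
        show n.toNat = (n - r).toNat + r.toNat by omega, List.range_add]
      simp only [List.map_append, List.map_map]
      refine congrArg₂ (· ++ ·) (List.map_congr_left ?_) (List.map_congr_left ?_)
      · intro i hi
        simp only [List.mem_range] at hi
        simp only [Function.comp_apply]
        rw [slot_value n s hpos i (by omega), if_pos (by omega)]
      · intro i hi
        simp only [List.mem_range] at hi
        simp only [Function.comp_apply]
        push_cast
        rw [show ((n - r).toNat : Int) + (i : Int) = (((n - r).toNat + i : Nat) : Int) by push_cast; ring,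
          slot_value n s hpos ((n - r).toNat + i) (by push_cast; omega),
          if_neg (by push_cast; omega)]

-- ===== VERDICT (by name: the statement is the Claim_ definition above) =====
theorem solution_spec : Claim_equal_solution := by
  intro n s _ hpre
  unfold Spec_solution
  exact main_eq n s hpre
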